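-- pv_equiv track=rewrite | github.com/keeneyd/Advent_of_Code_2021 | solutions/day_12/day_12.py | double_small
-- ===== SOURCE A (Python) =====
-- def double_small(path):
--     smalls = {}
--     for p in path:
--         if p.islower():
--             count = smalls.get(p,0)
--             if count > 0:
--                 return True
--             smalls[p] = 1
--     return False
-- ===== SOURCE B (Python) =====
-- def double_small(path):
--     smalls = [p for p in path if p.islower()]
--     return len(smalls) != len(set(smalls))
-- ===== Notes on version B (the rewrite author's own statement) =====
-- stated objective: idiomatic
-- what changed: Replaces the incremental seen-dict loop with an early return by a flat collect-then-compare: filter the lowercase elements in one comprehension and compare the list's length with its set's cardinality.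
import Mathlib
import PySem

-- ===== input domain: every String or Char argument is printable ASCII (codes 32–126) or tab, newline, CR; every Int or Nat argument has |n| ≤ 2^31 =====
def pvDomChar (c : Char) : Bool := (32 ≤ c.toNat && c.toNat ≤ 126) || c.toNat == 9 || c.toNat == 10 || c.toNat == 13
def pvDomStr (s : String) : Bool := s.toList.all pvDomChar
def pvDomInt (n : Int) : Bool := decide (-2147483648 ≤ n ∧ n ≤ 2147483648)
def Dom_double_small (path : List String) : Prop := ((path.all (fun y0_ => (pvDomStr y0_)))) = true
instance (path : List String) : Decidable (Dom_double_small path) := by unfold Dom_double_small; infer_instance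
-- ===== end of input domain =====

-- B replaces A's incremental seen-dict loop (with early return) by a flat
-- collect-then-compare: filter the lowercase elements, compare list length
-- with the cardinality of their set. Objective: more idiomatic; same O(n) cost.

-- str.islower(): at least one cased character and no uppercase cased character;
-- exact on the ASCII domain (Dom), where the cased characters are A-Z/a-z.
def pyIslower (s : String) : Bool :=
  s.toList.any PySem.Chars.isalpha && s.toList.all (fun c => !(PySem.Chars.isupper c))

-- ===== PORT A =====
-- the 'for p in path' loop with its early 'return True', state = the dict 'smalls'
def dsGo : List String → PySem.Dict String Int → Bool
  | [], _ => false
  | p :: rest, smalls =>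
    if pyIslower p then
      if smalls.getD p 0 > 0 then true
      else dsGo rest (smalls.insert p 1)
    else dsGo rest smalls

def double_small (path : List String) : Bool :=
  dsGo path PySem.Dict.empty

-- ===== PORT B =====
def double_small_alt (path : List String) : Bool :=
  let smalls := path.filter pyIslower
  smalls.length != (PySem.Set.ofList smalls).length

-- ===== PRECONDITION & SPEC =====
def Spec_double_small (path : List String) (out : Bool) : Prop := out = double_small_alt path
instance (path : List String) (out : Bool) : Decidable (Spec_double_small path out) := by unfold Spec_double_small; infer_instance

-- ===== CLAIM (what is proved, stated in full; the proofs are below) =====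
def Claim_equal_double_small : Prop := ∀ (path : List String), Dom_double_small path → Spec_double_small path (double_small path)

-- ===== LEMMAS AND PROOFS =====

-- the foldl over Set.add can add at most one element per step
theorem length_foldl_add_le {α : Type} [BEq α] (l : List α) (s : PySem.Set α) :
    (l.foldl PySem.Set.add s).length ≤ s.length + l.length := by
  induction l generalizing s with
  | nil => simp
  | cons x l ih =>
    simp only [List.foldl_cons, List.length_cons]
    refine (ih (PySem.Set.add s x)).trans ?_
    have : (PySem.Set.add s x).length ≤ s.length + 1 := by
      unfold PySem.Set.add
      split <;> simp
    omega

-- the set of a list has full cardinality exactly when the list has no duplicates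
theorem foldl_add_length_iff {α : Type} [BEq α] [LawfulBEq α] (l : List α) (s : PySem.Set α)
    (hnd : s.Nodup) :
    ((l.foldl PySem.Set.add s).length = s.length + l.length ↔ (s ++ l).Nodup) := by
  induction l generalizing s with
  | nil => simpa using hnd
  | cons x l ih =>
    simp only [List.foldl_cons]
    by_cases hx : x ∈ s
    · have ha : PySem.Set.add s x = s := by
        unfold PySem.Set.add PySem.Set.contains
        simp [hx]
      rw [ha]
      constructor
      · intro h
        have := length_foldl_add_le l s
        simp only [List.length_cons] at h
        omega
      · intro h
        exfalso
        exact (List.nodup_append.mp h).2.2 x hx x (by simp) rfl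
    · have ha : PySem.Set.add s x = s ++ [x] := by
        unfold PySem.Set.add PySem.Set.contains
        simp [hx]
      rw [ha]
      have hnd' : (s ++ [x]).Nodup := by
        rw [List.nodup_append]
        refine ⟨hnd, by simp, ?_⟩
        intro a ha' b hb
        simp only [List.mem_singleton] at hb
        subst hb
        exact fun he => hx (he ▸ ha')
      have hiff := ih (s ++ [x]) hnd'
      simp only [List.length_append, List.length_cons, List.length_nil] at hiff ⊢
      rw [show s.length + 1 + l.length = s.length + (l.length + 1) by omega] at hiff
      rw [hiff, List.append_assoc]
      simp

theorem ofList_length_iff {α : Type} [BEq α] [LawfulBEq α] (l : List α) :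
    ((PySem.Set.ofList l).length = l.length ↔ l.Nodup) := by
  rw [PySem.Set.ofList_eq_foldl]
  simpa using foldl_add_length_iff l ([] : PySem.Set α) (by simp)

-- A's loop returns true exactly when the keys seen so far plus the remaining
-- lowercase elements contain a duplicate
theorem dsGo_eq_true_iff (rest : List String) (d : PySem.Dict String Int)
    (hpos : ∀ p, 0 < d.getD p 0 ↔ p ∈ d.keys) (hnd : d.keys.Nodup) :
    (dsGo rest d = true ↔ ¬ (d.keys ++ rest.filter pyIslower).Nodup) := by
  induction rest generalizing d with
  | nil => simp [dsGo, hnd]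
  | cons p rest ih =>
    by_cases hl : pyIslower p = true
    · by_cases hmem : p ∈ d.keys
      · have : 0 < d.getD p 0 := (hpos p).mpr hmem
        simp only [dsGo, if_pos hl, if_pos this, true_iff]
        intro h
        rw [List.filter_cons_of_pos hl] at h
        have := (List.nodup_append.mp h).2.2
        exact this p hmem p (by simp) rfl
      · have hng : ¬ 0 < d.getD p 0 := fun h => hmem ((hpos p).mp h)
        have hc : d.contains p = false := by
          rw [← Bool.not_eq_true, PySem.Dict.contains_iff_mem_keys]; exact hmem
        have hkeys : (d.insert p 1).keys = d.keys ++ [p] :=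
          PySem.Dict.keys_insert_of_not_contains d 1 hc
        have hpos' : ∀ q, 0 < (d.insert p 1).getD q 0 ↔ q ∈ (d.insert p 1).keys := by
          intro q
          rw [PySem.Dict.getD_insert, PySem.Dict.mem_keys_insert]
          split
          · simp_all
          · rw [hpos q]; tauto
        have hnd' : (d.insert p 1).keys.Nodup := PySem.Dict.nodup_keys_insert d p 1 hnd
        simp only [dsGo, if_pos hl, if_neg hng]
        rw [ih (d.insert p 1) hpos' hnd', hkeys, List.filter_cons_of_pos hl,
          List.append_assoc, List.singleton_append]
    · simp only [dsGo, if_neg hl]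
      rw [ih d hpos hnd, List.filter_cons_of_neg (by simpa using hl)]

-- ===== VERDICT (by name: the statement is the Claim_ definition above) =====
theorem double_small_spec : Claim_equal_double_small := by
  intro path _
  unfold Spec_double_small double_small double_small_alt
  have hA : (dsGo path PySem.Dict.empty = true ↔ ¬ (path.filter pyIslower).Nodup) := by
    have := dsGo_eq_true_iff path PySem.Dict.empty
      (by intro p; simp [PySem.Dict.getD_empty]) (by simp [PySem.Dict.keys_empty])
    simpa [PySem.Dict.keys_empty] using this
  have hB : ((path.filter pyIslower).length != (PySem.Set.ofList (path.filter pyIslower)).length) = true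
      ↔ ¬ (path.filter pyIslower).Nodup := by
    rw [bne_iff_ne, ← ofList_length_iff (path.filter pyIslower)]
    exact ⟨fun h => fun he => h he.symm, fun h => fun he => h he.symm⟩
  rw [Bool.eq_iff_iff, hA]
  exact hB.symm
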